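-- pv_equiv track=rewrite | github.com/AustinSenson/marvel-gen4 | errorCodeDecoder.py | get_errors_from_code
-- ===== SOURCE A (Python) =====
-- def get_errors_from_code(error_code):
--     # Define the error mapping
--     error_matrix = {
--         1: {
--             1: "Over Current Charge",
--             2: "High Imbalance",
--             4: "PCB Temperature Error",
--             8: "External NTC Temperature Error",
--             16: "Efuse Discharge",
--             32: "Efuse Charge",
--             64: "Under Voltage",
--             128: "Over Voltage",
--         },
--         0: {
--             1: "Over Current Discharge",
--             4: "EEPROM Write Fail",
--             8: "EEPROM Read Fail",
--             16: "Marvel Permanent Fail",  # Corrected bit value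
--             32: "Precharge Retry Fail",   # Corrected bit value
--         },
--     }
--
--     errors = []
--     # Check each byte and extract errors
--     for byte, error_map in error_matrix.items():
--         byte_value = (error_code >> (byte * 8)) & 0xFF  # Extract the relevant byte
--         for bit_value, error_desc in error_map.items():
--             if byte_value & bit_value:  # Check if the bit is set
--                 errors.append(error_desc)
--
--     return errors
-- ===== SOURCE B (Python) =====
-- # Instead of scanning a fixed table of masks, B iterates only over the SET bits
-- # of the error code: it masks out each byte's region, repeatedly pops the lowest
-- # set bit (x & -x) and looks the isolated bit up in a dict keyed by absolute
-- # bit mask (unknown bits are skipped). High-byte region first, then low byte,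
-- # which reproduces A's append order.
-- DESC = {
--     1 << 8: "Over Current Charge",
--     2 << 8: "High Imbalance",
--     4 << 8: "PCB Temperature Error",
--     8 << 8: "External NTC Temperature Error",
--     16 << 8: "Efuse Discharge",
--     32 << 8: "Efuse Charge",
--     64 << 8: "Under Voltage",
--     128 << 8: "Over Voltage",
--     1: "Over Current Discharge",
--     4: "EEPROM Write Fail",
--     8: "EEPROM Read Fail",
--     16: "Marvel Permanent Fail",
--     32: "Precharge Retry Fail",
-- }
--
-- def get_errors_from_code(error_code):
--     errors = []
--     for part in (error_code & 0xFF00, error_code & 0xFF):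
--         while part:
--             low = part & -part          # isolate lowest set bit
--             desc = DESC.get(low)
--             if desc is not None:
--                 errors.append(desc)
--             part ^= low                 # clear it
--     return errors
-- ===== Notes on version B (the rewrite author's own statement) =====
-- stated objective: alternative
-- what changed: Instead of A's two-level scan over a fixed byte->bit table testing every known mask, B iterates only over the set bits of the code: per byte region it repeatedly isolates the lowest set bit with x & -x and looks that bit up in a dict keyed by absolute mask, skipping unknown bits.
import Mathlib
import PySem

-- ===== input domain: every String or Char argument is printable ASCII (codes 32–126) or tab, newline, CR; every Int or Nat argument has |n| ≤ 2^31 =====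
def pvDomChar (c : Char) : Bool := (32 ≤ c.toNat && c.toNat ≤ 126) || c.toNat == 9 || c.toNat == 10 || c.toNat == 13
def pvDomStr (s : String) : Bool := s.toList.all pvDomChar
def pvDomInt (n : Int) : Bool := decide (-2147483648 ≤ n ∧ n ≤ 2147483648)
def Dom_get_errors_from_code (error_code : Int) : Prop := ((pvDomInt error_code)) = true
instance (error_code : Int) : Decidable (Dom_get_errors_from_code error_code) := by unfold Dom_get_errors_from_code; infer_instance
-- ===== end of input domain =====

-- B replaces A's fixed two-level table scan by iterating over the set bits of the
-- code (repeatedly popping the lowest set bit and looking it up in a mask-keyed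
-- dict); alternative algorithm, same results in the same order.


-- ===== PORT A =====
def get_errors_from_code (error_code : Int) : List String :=
  let error_matrix : List (Int × List (Int × String)) :=
    [(1, [(1, "Over Current Charge"), (2, "High Imbalance"), (4, "PCB Temperature Error"),
          (8, "External NTC Temperature Error"), (16, "Efuse Discharge"), (32, "Efuse Charge"),
          (64, "Under Voltage"), (128, "Over Voltage")]),
     (0, [(1, "Over Current Discharge"), (4, "EEPROM Write Fail"), (8, "EEPROM Read Fail"),
          (16, "Marvel Permanent Fail"), (32, "Precharge Retry Fail")])]
  error_matrix.foldl
    (fun errors be =>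
      let byte_value := PySem.Int.band (error_code >>> (be.1 * 8)) 255
      be.2.foldl
        (fun errors bd => if PySem.Int.band byte_value bd.1 != 0 then errors ++ [bd.2] else errors)
        errors)
    []

-- ===== PORT B =====
def descDict : PySem.Dict Int String :=
  PySem.Dict.ofList
    [(1 <<< 8, "Over Current Charge"), (2 <<< 8, "High Imbalance"), (4 <<< 8, "PCB Temperature Error"),
     (8 <<< 8, "External NTC Temperature Error"), (16 <<< 8, "Efuse Discharge"), (32 <<< 8, "Efuse Charge"),
     (64 <<< 8, "Under Voltage"), (128 <<< 8, "Over Voltage"),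
     (1, "Over Current Discharge"), (4, "EEPROM Write Fail"), (8, "EEPROM Read Fail"),
     (16, "Marvel Permanent Fail"), (32, "Precharge Retry Fail")]

-- Source B's 'while part:' loop; the fuel 17 only makes it structurally total: each
-- masked part is a nonnegative value < 2^16, so the loop runs at most 16 times.
def bitLoop : Nat → Int → List String → List String
  | 0, _, acc => acc
  | fuel + 1, x, acc =>
    if x == 0 then acc
    else
      let low := PySem.Int.band x (-x)
      let acc' := match descDict.get? low with
        | some d => acc ++ [d]
        | none => acc
      bitLoop fuel (PySem.Int.bxor x low) acc'

def get_errors_from_code_alt (error_code : Int) : List String :=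
  [PySem.Int.band error_code 65280, PySem.Int.band error_code 255].foldl
    (fun errors part => bitLoop 17 part errors) []

-- ===== PRECONDITION & SPEC =====
def Spec_get_errors_from_code (error_code : Int) (out : List String) : Prop := out = get_errors_from_code_alt error_code
instance (error_code : Int) (out : List String) : Decidable (Spec_get_errors_from_code error_code out) := by unfold Spec_get_errors_from_code; infer_instance

-- ===== CLAIM (what is proved, stated in full; the proofs are below) =====
def Claim_equal_get_errors_from_code : Prop := ∀ (error_code : Int), Dom_get_errors_from_code error_code → Spec_get_errors_from_code error_code (get_errors_from_code error_code)

-- ===== LEMMAS AND PROOFS =====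

-- Python & with a negative left argument (two's-complement branch of PySem.Int.band)
theorem pv_band_negSucc_ofNat (p b : Nat) :
    PySem.Int.band (Int.negSucc p) (Int.ofNat b) = Int.ofNat (b - (b &&& p)) := by
  unfold PySem.Int.band
  split_ifs with h1 h2 h3
  · exact absurd h1 (Int.negSucc_not_nonneg p).mp
  · exact absurd h1 (Int.negSucc_not_nonneg p).mp
  · have hp : (-(Int.negSucc p) - 1).toNat = p := by simp [Int.negSucc_eq]
    rw [hp]; rfl
  · simp [Int.ofNat_eq_natCast] at h3

-- accumulator factoring for Source B's while-loop
theorem pv_bitLoop_acc (fuel : Nat) : ∀ (x : Int) (acc : List String),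
    bitLoop fuel x acc = acc ++ bitLoop fuel x [] := by
  induction fuel with
  | zero => intro x acc; simp [bitLoop]
  | succ f ih =>
    intro x acc
    by_cases h : x == 0
    · simp [bitLoop, h]
    · simp only [bitLoop, h]
      cases hd : descDict.get? (PySem.Int.band x (-x)) with
      | some d =>
        simp only [Bool.false_eq_true, if_false]
        rw [ih _ (acc ++ [d]), ih _ ([] ++ [d])]
        simp
      | none =>
        simp only [Bool.false_eq_true, if_false]
        rw [ih _ acc]

-- accumulator factoring for A's inner scan
theorem pv_scan_acc (bv : Int) (l : List (Int × String)) (acc : List String) :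
    l.foldl (fun errors bd => if PySem.Int.band bv bd.1 != 0 then errors ++ [bd.2] else errors) acc
      = acc ++ l.foldl (fun errors bd => if PySem.Int.band bv bd.1 != 0 then errors ++ [bd.2] else errors) [] := by
  rw [PySem.List.foldl_append_if (p := fun bd => PySem.Int.band bv bd.1 != 0) (f := Prod.snd),
      PySem.List.foldl_append_if (p := fun bd => PySem.Int.band bv bd.1 != 0) (f := Prod.snd)]
  simp

-- 255.testBit j = (j < 8)
theorem pv_testBit_255 (j : Nat) : (255 : Nat).testBit j = decide (j < 8) := by
  rw [show (255 : Nat) = 2 ^ 8 - 1 by norm_num, Nat.testBit_two_pow_sub_one]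

-- masking the high-byte region = extracting the byte and shifting it back up
theorem pv_nat_hi (m : Nat) : m &&& 65280 = ((m >>> 8) &&& 255) <<< 8 := by
  apply Nat.eq_of_testBit_eq
  intro i
  rw [show (65280 : Nat) = 255 <<< 8 by decide]
  simp only [Nat.testBit_land, Nat.testBit_shiftLeft, Nat.testBit_shiftRight, pv_testBit_255]
  by_cases h : 8 ≤ i
  · rw [show 8 + (i - 8) = i by omega]
    by_cases h2 : i - 8 < 8 <;> simp [h, h2, Bool.and_comm]
  · simp [h]

-- the two byte values A extracts are nonnegative and < 256
theorem pv_byteHi (e : Int) :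
    PySem.Int.band (e >>> (8 : Int)) 255 = Int.ofNat (PySem.Int.band (e >>> (8 : Int)) 255).toNat ∧
    (PySem.Int.band (e >>> (8 : Int)) 255).toNat < 256 := by
  cases e with
  | ofNat m =>
    rw [Int.ofNat_eq_natCast, show ((8 : Int)) = ((8 : Nat) : Int) by norm_num,
        Int.shiftRight_natCast, show (255 : Int) = ((255 : Nat) : Int) by norm_num,
        PySem.Int.band_natCast]
    refine ⟨by simp, ?_⟩
    simp only [Int.toNat_natCast]
    have := Nat.and_le_right (n := m >>> 8) (m := 255)
    omega
  | negSucc p =>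
    rw [show ((8 : Int)) = ((8 : Nat) : Int) by norm_num, Int.shiftRight_negSucc,
        show (255 : Int) = Int.ofNat 255 from rfl, pv_band_negSucc_ofNat]
    refine ⟨by simp, ?_⟩
    simp only [Int.ofNat_eq_natCast, Int.toNat_natCast]
    omega

theorem pv_byteLo (e : Int) :
    PySem.Int.band (e >>> (0 : Int)) 255 = Int.ofNat (PySem.Int.band (e >>> (0 : Int)) 255).toNat ∧
    (PySem.Int.band (e >>> (0 : Int)) 255).toNat < 256 := by
  cases e with
  | ofNat m =>
    rw [Int.ofNat_eq_natCast, show ((0 : Int)) = ((0 : Nat) : Int) by norm_num,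
        Int.shiftRight_natCast, show (255 : Int) = ((255 : Nat) : Int) by norm_num,
        PySem.Int.band_natCast]
    refine ⟨by simp, ?_⟩
    simp only [Int.toNat_natCast]
    have := Nat.and_le_right (n := m >>> 0) (m := 255)
    omega
  | negSucc p =>
    rw [show ((0 : Int)) = ((0 : Nat) : Int) by norm_num, Int.shiftRight_negSucc,
        show (255 : Int) = Int.ofNat 255 from rfl, pv_band_negSucc_ofNat]
    refine ⟨by simp, ?_⟩
    simp only [Int.ofNat_eq_natCast, Int.toNat_natCast]
    omega

-- B's high masked part is A's high byte shifted back into place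
theorem pv_part_hi (e : Int) :
    PySem.Int.band e 65280 = Int.ofNat ((PySem.Int.band (e >>> (8 : Int)) 255).toNat * 256) := by
  cases e with
  | ofNat m =>
    rw [Int.ofNat_eq_natCast, show ((8 : Int)) = ((8 : Nat) : Int) by norm_num,
        Int.shiftRight_natCast, show (255 : Int) = ((255 : Nat) : Int) by norm_num,
        show (65280 : Int) = ((65280 : Nat) : Int) by norm_num,
        PySem.Int.band_natCast, PySem.Int.band_natCast]
    simp only [Int.toNat_natCast, Int.ofNat_eq_natCast]
    rw [pv_nat_hi m, Nat.shiftLeft_eq]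
  | negSucc p =>
    rw [show ((8 : Int)) = ((8 : Nat) : Int) by norm_num, Int.shiftRight_negSucc,
        show (255 : Int) = Int.ofNat 255 from rfl,
        show (65280 : Int) = Int.ofNat 65280 from rfl,
        pv_band_negSucc_ofNat, pv_band_negSucc_ofNat]
    simp only [Int.ofNat_eq_natCast, Int.toNat_natCast]
    rw [show (65280 : Nat) &&& p = p &&& 65280 from Nat.land_comm _ _, pv_nat_hi p,
        Nat.shiftLeft_eq, show (255 : Nat) &&& (p >>> 8) = (p >>> 8) &&& 255 from Nat.land_comm _ _]
    have h1 : (p >>> 8) &&& 255 ≤ 255 := Nat.and_le_right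
    push_cast
    omega

-- B's low masked part is A's low byte
theorem pv_part_lo (e : Int) :
    PySem.Int.band e 255 = Int.ofNat (PySem.Int.band (e >>> (0 : Int)) 255).toNat := by
  cases e with
  | ofNat m =>
    rw [Int.ofNat_eq_natCast, show ((0 : Int)) = ((0 : Nat) : Int) by norm_num,
        Int.shiftRight_natCast, show (255 : Int) = ((255 : Nat) : Int) by norm_num,
        PySem.Int.band_natCast, PySem.Int.band_natCast]
    simp only [Int.toNat_natCast, Int.ofNat_eq_natCast, Nat.shiftRight_zero]
  | negSucc p =>
    rw [show ((0 : Int)) = ((0 : Nat) : Int) by norm_num, Int.shiftRight_negSucc,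
        show (255 : Int) = Int.ofNat 255 from rfl, pv_band_negSucc_ofNat, pv_band_negSucc_ofNat]
    simp

-- case tables: B's pop-lowest-bit loop on a byte region agrees with A's inner scan
set_option maxRecDepth 40000 in
theorem pv_hi_table : ∀ n : Fin 256, bitLoop 17 (Int.ofNat (n.val * 256)) [] =
    ([(1, "Over Current Charge"), (2, "High Imbalance"), (4, "PCB Temperature Error"),
      (8, "External NTC Temperature Error"), (16, "Efuse Discharge"), (32, "Efuse Charge"),
      (64, "Under Voltage"), (128, "Over Voltage")] : List (Int × String)).foldl
      (fun errors bd => if PySem.Int.band (Int.ofNat n.val) bd.1 != 0 then errors ++ [bd.2] else errors) [] := by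
  decide

set_option maxRecDepth 40000 in
theorem pv_lo_table : ∀ n : Fin 256, bitLoop 17 (Int.ofNat n.val) [] =
    ([(1, "Over Current Discharge"), (4, "EEPROM Write Fail"), (8, "EEPROM Read Fail"),
      (16, "Marvel Permanent Fail"), (32, "Precharge Retry Fail")] : List (Int × String)).foldl
      (fun errors bd => if PySem.Int.band (Int.ofNat n.val) bd.1 != 0 then errors ++ [bd.2] else errors) [] := by
  decide

theorem pv_main (e : Int) : get_errors_from_code e = get_errors_from_code_alt e := by
  obtain ⟨hH, hHlt⟩ := pv_byteHi e
  obtain ⟨hL, hLlt⟩ := pv_byteLo e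
  have hA : get_errors_from_code e =
      ([(1, "Over Current Discharge"), (4, "EEPROM Write Fail"), (8, "EEPROM Read Fail"),
        (16, "Marvel Permanent Fail"), (32, "Precharge Retry Fail")] : List (Int × String)).foldl
        (fun errors bd => if PySem.Int.band (PySem.Int.band (e >>> (0 : Int)) 255) bd.1 != 0 then errors ++ [bd.2] else errors)
        (([(1, "Over Current Charge"), (2, "High Imbalance"), (4, "PCB Temperature Error"),
           (8, "External NTC Temperature Error"), (16, "Efuse Discharge"), (32, "Efuse Charge"),
           (64, "Under Voltage"), (128, "Over Voltage")] : List (Int × String)).foldl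
          (fun errors bd => if PySem.Int.band (PySem.Int.band (e >>> (8 : Int)) 255) bd.1 != 0 then errors ++ [bd.2] else errors) []) := by
    rfl
  have hB : get_errors_from_code_alt e =
      bitLoop 17 (Int.ofNat ((PySem.Int.band (e >>> (8 : Int)) 255).toNat * 256)) [] ++
        bitLoop 17 (Int.ofNat (PySem.Int.band (e >>> (0 : Int)) 255).toNat) [] := by
    simp only [get_errors_from_code_alt, List.foldl_cons, List.foldl_nil]
    rw [pv_part_hi e, pv_part_lo e]
    rw [pv_bitLoop_acc 17 (Int.ofNat (PySem.Int.band (e >>> (0 : Int)) 255).toNat)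
          (bitLoop 17 (Int.ofNat ((PySem.Int.band (e >>> (8 : Int)) 255).toNat * 256)) [])]
  rw [hA, pv_scan_acc]
  rw [hB]
  rw [pv_hi_table ⟨(PySem.Int.band (e >>> (8 : Int)) 255).toNat, hHlt⟩,
      pv_lo_table ⟨(PySem.Int.band (e >>> (0 : Int)) 255).toNat, hLlt⟩]
  rw [← hH, ← hL]

-- ===== VERDICT (by name: the statement is the Claim_ definition above) =====
theorem get_errors_from_code_spec : Claim_equal_get_errors_from_code := by
  intro e _
  unfold Spec_get_errors_from_code
  exact pv_main e
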